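-- pv_equiv track=rewrite | github.com/wrCisco/adventcode2020 | day20/day20.py | configurations
-- ===== SOURCE A (Python) =====
-- def configurations(borders):
--     '''
--     borders: list of 4 strings representing the 4 borders of a tile.
--
--     return: list of all possible configurations of borders after
--     transforms (rotations are always clockwise):
--     0: as is
--     1: flip horizontally
--     2: flip vertically
--     3: rotate 90° then flip horizontally
--     4: rotate 90° then flip vertically
--     5: rotate 90°
--     6: rotate 180°
--     7: rotate 270°
--     '''
--     flips = lambda x: (
--         [x[0][::-1], x[3], x[2][::-1], x[1]],
--         [x[2], x[1][::-1], x[0], x[3][::-1]]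
--     )
--     arrs = []
--     for n in range(4):
--         arrs.append(borders.copy())
--         if not n:
--             arrs.extend(flips(borders))
--         borders = [borders[3][::-1], borders[0], borders[1][::-1], borders[2]]
--         if not n:
--             arrs.extend(flips(borders))
--     return arrs
-- ===== SOURCE B (Python) =====
-- # Table-driven: configuration 0 is the tile "as is" (a copy); each of the other
-- # seven is pure data, a list of (source border index, reversed?) pairs
-- # precomputed once from the geometry of the transforms.
-- _TABLE = [
--     [(0, 1), (3, 0), (2, 1), (1, 0)],  # flip horizontally
--     [(2, 0), (1, 1), (0, 0), (3, 1)],  # flip vertically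
--     [(3, 0), (2, 0), (1, 0), (0, 0)],  # rotate 90 then flip h
--     [(1, 1), (0, 1), (3, 1), (2, 1)],  # rotate 90 then flip v
--     [(3, 1), (0, 0), (1, 1), (2, 0)],  # rotate 90
--     [(2, 1), (3, 1), (0, 1), (1, 1)],  # rotate 180
--     [(1, 0), (2, 1), (3, 0), (0, 1)],  # rotate 270
-- ]
--
-- def configurations(borders):
--     return [list(borders)] + [
--         [borders[i][::-1] if r else borders[i] for i, r in cfg]
--         for cfg in _TABLE]
-- ===== Notes on version B (the rewrite author's own statement) =====
-- stated objective: alternative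
-- what changed: B replaces A's 4-iteration loop threading a mutated rotated state (with a special-cased first iteration and an inline flips lambda) by a precomputed data table: each non-identity configuration is a list of (source-index, reversed?) pairs applied uniformly, plus a literal copy for the 'as is' configuration.
import Mathlib
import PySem

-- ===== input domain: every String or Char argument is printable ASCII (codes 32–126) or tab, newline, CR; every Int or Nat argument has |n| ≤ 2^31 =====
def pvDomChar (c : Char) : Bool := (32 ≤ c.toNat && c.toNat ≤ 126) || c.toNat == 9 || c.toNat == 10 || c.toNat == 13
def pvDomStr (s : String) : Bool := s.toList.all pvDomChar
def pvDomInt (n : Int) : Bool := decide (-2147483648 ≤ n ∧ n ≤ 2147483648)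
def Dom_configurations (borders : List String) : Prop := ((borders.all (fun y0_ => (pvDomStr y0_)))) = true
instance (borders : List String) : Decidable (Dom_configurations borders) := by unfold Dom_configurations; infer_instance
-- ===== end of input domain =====

-- B replaces A's state-threading loop by a precomputed (index, reversed?) table; same cost, alternative structure.

-- ===== PORT A =====
-- x[::-1] on a string is reversal; String.mk of the reversed char list is exact.
def pvRevA (s : String) : String := String.mk s.toList.reverse
-- borders[i]; Pre_ guarantees 4 ≤ length so pyGet? is some; getD "" is unreachable inside Pre_.
def pvGetA (xs : List String) (i : Int) : String := (PySem.List.pyGet? xs i).getD ""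
-- the 'flips' lambda of A, returning the two flipped configurations
def pvFlipsA (x : List String) : List (List String) :=
  [[pvRevA (pvGetA x 0), pvGetA x 3, pvRevA (pvGetA x 2), pvGetA x 1],
   [pvGetA x 2, pvRevA (pvGetA x 1), pvGetA x 0, pvRevA (pvGetA x 3)]]
-- the in-loop rotation assignment
def pvRotA (b : List String) : List String :=
  [pvRevA (pvGetA b 3), pvGetA b 0, pvRevA (pvGetA b 1), pvGetA b 2]

def configurations (borders : List String) : List (List String) :=
  ((List.range 4).foldl
    (fun (st : List (List String) × List String) n =>
      let arrs1 := st.1 ++ [st.2]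
      let arrs2 := if n == 0 then arrs1 ++ pvFlipsA st.2 else arrs1
      let b' := pvRotA st.2
      let arrs3 := if n == 0 then arrs2 ++ pvFlipsA b' else arrs2
      (arrs3, b'))
    ([], borders)).1

-- ===== PORT B =====
def pvRevB (s : String) : String := String.mk s.toList.reverse
def pvGetB (xs : List String) (i : Int) : String := (PySem.List.pyGet? xs i).getD ""
-- the precomputed table of Source B: (source border index, reversed? as 0/1)
def pvTableB : List (List (Int × Int)) :=
  [[(0, 1), (3, 0), (2, 1), (1, 0)],
   [(2, 0), (1, 1), (0, 0), (3, 1)],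
   [(3, 0), (2, 0), (1, 0), (0, 0)],
   [(1, 1), (0, 1), (3, 1), (2, 1)],
   [(3, 1), (0, 0), (1, 1), (2, 0)],
   [(2, 1), (3, 1), (0, 1), (1, 1)],
   [(1, 0), (2, 1), (3, 0), (0, 1)]]

def configurations_alt (borders : List String) : List (List String) :=
  [borders] ++
    pvTableB.map (fun cfg =>
      cfg.map (fun p => if p.2 ≠ 0 then pvRevB (pvGetB borders p.1) else pvGetB borders p.1))

-- ===== PRECONDITION & SPEC =====
-- A indexes borders[3], so it raises IndexError on lists shorter than 4; Pre_ excludes exactly those.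
def Pre_configurations (borders : List String) : Prop := 4 ≤ borders.length
instance (borders : List String) : Decidable (Pre_configurations borders) := by unfold Pre_configurations; infer_instance
def pvWitness_configurations : List String := ["ab", "cd", "ef", "gh"]

def Spec_configurations (borders : List String) (out : List (List String)) : Prop := out = configurations_alt borders
instance (borders : List String) (out : List (List String)) : Decidable (Spec_configurations borders out) := by unfold Spec_configurations; infer_instance

-- ===== CLAIM (what is proved, stated in full; the proofs are below) =====
def Claim_equal_configurations : Prop := ∀ (borders : List String), Dom_configurations borders → Pre_configurations borders → Spec_configurations borders (configurations borders)

-- ===== LEMMAS AND PROOFS =====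
theorem pvToList_mk (l : List Char) : (String.mk l).toList = l :=
  Eq.symm ((fun {l s} => String.ofList_eq.mp) rfl)
theorem pvRev_rev (s : String) : String.mk (String.mk s.toList.reverse).toList.reverse = s := by
  apply String.toList_injective
  simp [pvToList_mk]

-- ===== VERDICT (by name: the statement is the Claim_ definition above) =====
theorem configurations_spec : Claim_equal_configurations := by
  intro borders _ _
  show configurations borders = configurations_alt borders
  simp [configurations, configurations_alt, List.range_succ, pvFlipsA, pvRotA,
        pvTableB, pvRevA, pvRevB, pvGetA, pvGetB, pvRev_rev]
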